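-- pv_equiv track=rewrite | github.com/vpc-ccg/freddie | py/find_canonical_exons_iteratively.py | merge_exons
-- ===== SOURCE A (Python) =====
-- def merge_exons(exons, range_len):
--     final_exon_intervals = list()
--     eid = 0
--     while eid < len(exons):
--         s,e = exons[eid]['interval']
--         while e-s < range_len and eid+1 < len(exons):
--             eid += 1
--             _,e = exons[eid]['interval']
--         final_exon_intervals.append([s,e])
--         eid += 1
--     return final_exon_intervals
-- ===== SOURCE B (Python) =====
-- def merge_exons(exons, range_len):
--     out = []
--     start = None
--     end = 0
--     for exon in exons:
--         s, e = exon['interval']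
--         if start is None:
--             start = s
--         if e - start >= range_len:
--             out.append([start, e])
--             start = None
--         end = e
--     if start is not None:
--         out.append([start, end])
--     return out
-- ===== Notes on version B (the rewrite author's own statement) =====
-- stated objective: simpler
-- what changed: Replaces the nested index-based while loops with a single for-loop over the exons maintaining an open-group accumulator (start/end) plus a final flush.
import Mathlib
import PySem

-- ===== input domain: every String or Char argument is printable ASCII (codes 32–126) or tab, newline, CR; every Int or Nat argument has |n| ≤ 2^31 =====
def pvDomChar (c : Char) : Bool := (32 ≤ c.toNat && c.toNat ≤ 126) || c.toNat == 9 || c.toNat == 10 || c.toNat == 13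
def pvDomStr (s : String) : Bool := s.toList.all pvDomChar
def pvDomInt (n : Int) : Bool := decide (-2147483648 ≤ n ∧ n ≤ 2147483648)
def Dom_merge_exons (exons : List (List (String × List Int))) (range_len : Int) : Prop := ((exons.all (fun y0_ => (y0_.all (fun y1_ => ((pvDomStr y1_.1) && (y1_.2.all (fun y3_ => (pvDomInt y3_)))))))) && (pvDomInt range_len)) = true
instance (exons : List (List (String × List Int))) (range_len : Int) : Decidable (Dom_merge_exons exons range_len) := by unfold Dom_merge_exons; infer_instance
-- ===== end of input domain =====

-- B replaces A's nested index-based while loops by one pass with an open-group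
-- accumulator and a final flush (objective: simpler).

-- ===== PORT A =====
-- s,e = d['interval'] : first-match lookup in the association list, then unpack a
-- 2-element list; (0, 0) is returned only where the Python raises (excluded by Pre_).
def pvIv (d : List (String × List Int)) : Int × Int :=
  match d.find? (fun kv => kv.1 == "interval") with
  | some (_, [a, b]) => (a, b)
  | _ => (0, 0)

-- inner 'while e-s < range_len and eid+1 < len(exons)' loop; returns final (e, eid)
def pvInnerA (exons : List (List (String × List Int))) (range_len s : Int) (e : Int) (eid : Nat) : Int × Nat :=
  if h : e - s < range_len ∧ eid + 1 < exons.length then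
    pvInnerA exons range_len s (pvIv (exons.getD (eid + 1) [])).2 (eid + 1)
  else (e, eid)
termination_by exons.length - eid
decreasing_by omega

theorem pvInnerA_ge (exons : List (List (String × List Int))) (range_len s e : Int) (eid : Nat) :
    eid ≤ (pvInnerA exons range_len s e eid).2 := by
  fun_induction pvInnerA with
  | case1 e eid h ih => omega
  | case2 e eid _ => simp

-- outer 'while eid < len(exons)' loop with accumulator final_exon_intervals
def pvOuterA (exons : List (List (String × List Int))) (range_len : Int) (eid : Nat) (acc : List (List Int)) : List (List Int) :=
  if h : eid < exons.length then
    let se := pvIv (exons.getD eid [])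
    let p := pvInnerA exons range_len se.1 se.2 eid
    pvOuterA exons range_len (p.2 + 1) (acc ++ [[se.1, p.1]])
  else acc
termination_by exons.length - eid
decreasing_by
  have := pvInnerA_ge exons range_len (pvIv (exons.getD eid [])).1 (pvIv (exons.getD eid [])).2 eid
  omega

def merge_exons (exons : List (List (String × List Int))) (range_len : Int) : List (List Int) :=
  pvOuterA exons range_len 0 []

-- ===== PORT B =====
-- one step of B's for-loop; state = (out, start (None = no open group), end)
def pvStepB (range_len : Int) (st : List (List Int) × Option Int × Int) (exon : List (String × List Int)) : List (List Int) × Option Int × Int :=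
  let e := (pvIv exon).2
  let start := match st.2.1 with | none => (pvIv exon).1 | some v => v
  if range_len ≤ e - start then (st.1 ++ [[start, e]], none, e)
  else (st.1, some start, e)

def merge_exons_alt (exons : List (List (String × List Int))) (range_len : Int) : List (List Int) :=
  let fin := exons.foldl (pvStepB range_len) ([], none, 0)
  match fin.2.1 with
  | none => fin.1
  | some start => fin.1 ++ [[start, fin.2.2]]

-- ===== PRECONDITION & SPEC =====
-- Pre_ excludes exactly the inputs on which the Python raises: an exon whose dict has
-- no 'interval' key (KeyError) or whose interval is not a 2-element list (ValueError on unpacking).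
def Pre_merge_exons (exons : List (List (String × List Int))) (range_len : Int) : Prop :=
  ∀ d ∈ exons, (match d.find? (fun kv => kv.1 == "interval") with
                | some (_, [_, _]) => true
                | _ => false) = true
instance (exons : List (List (String × List Int))) (range_len : Int) : Decidable (Pre_merge_exons exons range_len) := by unfold Pre_merge_exons; infer_instance

def pvWitness_merge_exons : (List (List (String × List Int))) × Int :=
  ([[("interval", [1, 5])], [("interval", [6, 7])]], 3)

def Spec_merge_exons (exons : List (List (String × List Int))) (range_len : Int) (out : List (List Int)) : Prop := out = merge_exons_alt exons range_len
instance (exons : List (List (String × List Int))) (range_len : Int) (out : List (List Int)) : Decidable (Spec_merge_exons exons range_len out) := by unfold Spec_merge_exons; infer_instance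

-- ===== CLAIM (what is proved, stated in full; the proofs are below) =====
def Claim_equal_merge_exons : Prop := ∀ (exons : List (List (String × List Int))) (range_len : Int), Dom_merge_exons exons range_len → Pre_merge_exons exons range_len → Spec_merge_exons exons range_len (merge_exons exons range_len)

-- ===== LEMMAS AND PROOFS =====

-- common reference form: grouping over the extracted interval list
mutual
def pvG (r : Int) : List (Int × Int) → List (List Int)
  | [] => []
  | (s, e) :: rest => pvE r s e rest
termination_by l => (l.length, 0)

def pvE (r s e : Int) (rest : List (Int × Int)) : List (List Int) :=
  if r ≤ e - s then [s, e] :: pvG r rest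
  else match rest with
    | [] => [[s, e]]
    | (_, e2) :: rest2 => pvE r s e2 rest2
termination_by (rest.length, 1)
end

theorem pvG_cons (r : Int) (pe : Int × Int) (rest : List (Int × Int)) :
    pvG r (pe :: rest) = pvE r pe.1 pe.2 rest := by
  cases pe; rw [pvG]

theorem pvE_closed (r s e : Int) (rest : List (Int × Int)) (hc : r ≤ e - s) :
    pvE r s e rest = [s, e] :: pvG r rest := by
  rw [pvE.eq_def]; simp [hc]

theorem pvE_nil (r s e : Int) (hns : ¬ r ≤ e - s) :
    pvE r s e [] = [[s, e]] := by
  rw [pvE.eq_def]; simp [hns]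

theorem pvE_cons (r s e : Int) (pe : Int × Int) (rest : List (Int × Int)) (hns : ¬ r ≤ e - s) :
    pvE r s e (pe :: rest) = pvE r s pe.2 rest := by
  cases pe; rw [pvE.eq_def]; simp [hns]

theorem pvInnerA_eq (exons : List (List (String × List Int))) (r s : Int) (e : Int) (eid : Nat) :
    pvE r s e ((exons.map pvIv).drop (eid + 1))
      = [s, (pvInnerA exons r s e eid).1] :: pvG r ((exons.map pvIv).drop ((pvInnerA exons r s e eid).2 + 1)) := by
  fun_induction pvInnerA exons r s e eid with
  | case1 e eid h ih =>
    have hlt : eid + 1 < exons.length := h.2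
    have hdrop : (exons.map pvIv).drop (eid + 1)
        = pvIv exons[eid + 1] :: (exons.map pvIv).drop (eid + 2) := by
      rw [List.drop_eq_getElem_cons (by simpa using hlt)]
      simp
    have hns : ¬ r ≤ e - s := by omega
    have hgetD : exons.getD (eid + 1) [] = exons[eid + 1] := List.getD_eq_getElem _ _ hlt
    rw [hdrop, pvE_cons r s e _ _ hns, ← ih]
    congr 1; simp [List.getElem?_eq_getElem hlt]
  | case2 e eid h =>
    by_cases hc : r ≤ e - s
    · rw [pvE_closed _ _ _ _ hc]
    · have hlen : ¬ eid + 1 < exons.length := by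
        rcases not_and_or.mp h with h1 | h2
        · omega
        · exact h2
      have hdrop : (exons.map pvIv).drop (eid + 1) = [] := by
        apply List.drop_eq_nil_of_le; simp; omega
      rw [hdrop, pvE_nil _ _ _ hc]
      simp [pvG]

theorem pvOuterA_eq (exons : List (List (String × List Int))) (r : Int) (eid : Nat) (acc : List (List Int)) :
    pvOuterA exons r eid acc = acc ++ pvG r ((exons.map pvIv).drop eid) := by
  fun_induction pvOuterA exons r eid acc with
  | case1 eid acc h se p ih =>
    have hdrop : (exons.map pvIv).drop eid
        = pvIv exons[eid] :: (exons.map pvIv).drop (eid + 1) := by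
      rw [List.drop_eq_getElem_cons (by simpa using h)]
      simp
    have hgetD : exons.getD eid [] = exons[eid] := List.getD_eq_getElem _ _ h
    rw [ih, hdrop, pvG_cons, pvInnerA_eq]
    simp only [se, p, hgetD]
    simp
  | case2 eid acc h =>
    have hdrop : (exons.map pvIv).drop eid = [] := by
      apply List.drop_eq_nil_of_le; simp; omega
    simp [hdrop, pvG]

def pvFlush (st : List (List Int) × Option Int × Int) : List (List Int) :=
  match st.2.1 with
  | none => st.1
  | some start => st.1 ++ [[start, st.2.2]]

theorem pvFoldB_eq (r : Int) (l : List (List (String × List Int))) :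
    (∀ acc e0, pvFlush (l.foldl (pvStepB r) (acc, none, e0)) = acc ++ pvG r (l.map pvIv))
    ∧ (∀ acc s e, ¬ r ≤ e - s →
        pvFlush (l.foldl (pvStepB r) (acc, some s, e)) = acc ++ pvE r s e (l.map pvIv)) := by
  induction l with
  | nil =>
    constructor
    · intro acc e0; simp [pvFlush, pvG]
    · intro acc s e hns; simp [pvFlush, pvE_nil _ _ _ hns]
  | cons x rest ih =>
    constructor
    · intro acc e0
      simp only [List.foldl_cons, List.map_cons]
      rw [pvStepB]
      simp only []
      rw [pvG_cons]
      by_cases hc : r ≤ (pvIv x).2 - (pvIv x).1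
      · rw [if_pos hc, ih.1, pvE_closed _ _ _ _ hc]
        simp
      · rw [if_neg hc, ih.2 _ _ _ hc]
    · intro acc s e hns
      simp only [List.foldl_cons, List.map_cons]
      rw [pvStepB]
      simp only []
      rw [pvE_cons _ _ _ _ _ hns]
      by_cases hc : r ≤ (pvIv x).2 - s
      · rw [if_pos hc, ih.1, pvE_closed _ _ _ _ hc]
        simp
      · rw [if_neg hc, ih.2 _ _ _ hc]

-- ===== VERDICT (by name: the statement is the Claim_ definition above) =====
theorem merge_exons_spec : Claim_equal_merge_exons := by
  intro exons range_len _ _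
  unfold Spec_merge_exons
  have hA : merge_exons exons range_len = pvG range_len (exons.map pvIv) := by
    rw [merge_exons, pvOuterA_eq]; simp
  have hB : merge_exons_alt exons range_len
      = pvFlush (exons.foldl (pvStepB range_len) ([], none, 0)) := rfl
  rw [hA, hB, (pvFoldB_eq range_len exons).1]
  simp
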